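-- pv_equiv track=rewrite | github.com/tomomist12-sketch/hs-hts-tool | app.py | _build_description_from_specifics
-- ===== SOURCE A (Python) =====
-- from typing import Dict, List, Optional, Set, Tuple
--
-- def _build_description_from_specifics(specifics: Dict[str, str]) -> str:
--     """
--     Item Specifics から判定に有用なテキストを構築する。
--     Brand, Material, Type 等の情報をキーワードとして追加。
--     """
--     parts = []
--     # 判定に有用なフィールドを優先抽出
--     priority_keys = [
--         "Brand", "Material", "Type", "Style", "Department", "Product Type",
--         "Category", "Sub-Type", "Product Line", "Model", "MPN",
--         "Manufacturer Part Number", "Color", "Size", "Pattern",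
--         "Fabric Type", "Outer Shell Material", "Upper Material",
--         "Sole Material", "Features", "Intended Use", "Sport",
--         # 日本語キー
--         "ブランド", "素材", "タイプ", "カテゴリ",
--     ]
--     seen = set()  # type: Set[str]
--     for key in priority_keys:
--         if key in specifics:
--             val = specifics[key]
--             parts.append(f"{key}: {val}")
--             seen.add(key)
--
--     # 残りのキーも追加（ただし冗長を避ける）
--     for key, val in specifics.items():
--         if key not in seen and val and val.lower() not in ("n/a", "does not apply", "-"):
--             parts.append(f"{key}: {val}")
--
--     return " | ".join(parts)
-- ===== SOURCE B (Python) =====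
-- def _build_description_from_specifics(specifics):
--     priority_keys = [
--         "Brand", "Material", "Type", "Style", "Department", "Product Type",
--         "Category", "Sub-Type", "Product Line", "Model", "MPN",
--         "Manufacturer Part Number", "Color", "Size", "Pattern",
--         "Fabric Type", "Outer Shell Material", "Upper Material",
--         "Sole Material", "Features", "Intended Use", "Sport",
--         "ブランド", "素材", "タイプ", "カテゴリ",
--     ]
--     sentinel = len(priority_keys)
--
--     def rank(key):
--         return priority_keys.index(key) if key in priority_keys else sentinel
--
--     parts = []
--     for key, val in sorted(specifics.items(), key=lambda kv: rank(kv[0])):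
--         if key in priority_keys:
--             parts.append(f"{key}: {val}")
--         elif val and val.lower() not in ("n/a", "does not apply", "-"):
--             parts.append(f"{key}: {val}")
--     return " | ".join(parts)
-- ===== Notes on version B (the rewrite author's own statement) =====
-- stated objective: alternative
-- what changed: Replaces A's two passes (a priority-key scan with a 'seen' set, then a filtered pass over the remaining items) by a single stable-sorted pass over the items keyed by each key's rank in the priority list, emitting priority keys unconditionally and filtering only the rest.
import Mathlib
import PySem

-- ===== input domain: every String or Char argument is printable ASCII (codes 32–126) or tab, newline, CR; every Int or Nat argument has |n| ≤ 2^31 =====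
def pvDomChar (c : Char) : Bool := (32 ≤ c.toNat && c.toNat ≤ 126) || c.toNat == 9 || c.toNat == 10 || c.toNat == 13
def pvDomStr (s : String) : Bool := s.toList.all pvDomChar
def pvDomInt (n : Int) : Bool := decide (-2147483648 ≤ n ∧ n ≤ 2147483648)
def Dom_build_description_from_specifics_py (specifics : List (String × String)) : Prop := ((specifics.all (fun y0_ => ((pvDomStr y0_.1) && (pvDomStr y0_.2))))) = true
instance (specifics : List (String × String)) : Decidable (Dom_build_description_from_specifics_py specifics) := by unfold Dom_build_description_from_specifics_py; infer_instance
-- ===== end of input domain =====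

-- B replaces A's two passes (priority scan with a 'seen' set, then a filtered pass over the
-- remaining items) by a single stable-sorted pass over the items keyed by priority-list rank
-- (objective: alternative decomposition, same exact output).

-- ===== PORT A =====
-- the shared module-level constant list of priority keys (identical literal in A and B)
def pvPriorityKeys : List String :=
  ["Brand", "Material", "Type", "Style", "Department", "Product Type",
   "Category", "Sub-Type", "Product Line", "Model", "MPN",
   "Manufacturer Part Number", "Color", "Size", "Pattern",
   "Fabric Type", "Outer Shell Material", "Upper Material",
   "Sole Material", "Features", "Intended Use", "Sport",
   "ブランド", "素材", "タイプ", "カテゴリ"]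

def build_description_from_specifics_py (specifics : List (String × String)) : String :=
  -- first loop: for key in priority_keys: if key in specifics: parts.append(...); seen.add(key)
  let st := pvPriorityKeys.foldl
    (fun (st : List String × PySem.Set String) key =>
      match (PySem.Dict.mk specifics).get? key with   -- 'key in specifics' + 'specifics[key]'
      | some val => (st.1 ++ [key ++ ": " ++ val], PySem.Set.add st.2 key)
      | none => st)
    ([], PySem.Set.empty)
  -- second loop: for key, val in specifics.items(): ...
  let parts := (PySem.Dict.mk specifics).items.foldl
    (fun (acc : List String) kv =>
      if !(PySem.Set.contains st.2 kv.1) && !(kv.2 == "") &&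
         !(["n/a", "does not apply", "-"].contains (PySem.Str.lower kv.2))
      then acc ++ [kv.1 ++ ": " ++ kv.2] else acc)
    st.1
  PySem.Str.join " | " parts

-- ===== PORT B =====
-- rank(key) = priority_keys.index(key) if key in priority_keys else len(priority_keys)
-- (PySem.List.index? is None exactly when the key is not in the list)
def pvRank (k : String) : Nat :=
  match PySem.List.index? pvPriorityKeys k with
  | some i => i
  | none => 26

def build_description_from_specifics_py_alt (specifics : List (String × String)) : String :=
  let parts := (PySem.List.sorted (PySem.Dict.mk specifics).items (fun kv => pvRank kv.1)).foldl
    (fun (acc : List String) kv =>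
      if pvPriorityKeys.contains kv.1 then acc ++ [kv.1 ++ ": " ++ kv.2]
      else if !(kv.2 == "") && !(["n/a", "does not apply", "-"].contains (PySem.Str.lower kv.2))
      then acc ++ [kv.1 ++ ": " ++ kv.2] else acc)
    []
  PySem.Str.join " | " parts

-- ===== PRECONDITION & SPEC =====
-- Pre_ excludes association lists with duplicate keys: they correspond to no Python dict input
-- (a Python dict cannot hold a key twice), so the ports' behaviour there mirrors no Python run.
def Pre_build_description_from_specifics_py (specifics : List (String × String)) : Prop :=
  (specifics.map Prod.fst).Nodup
instance (specifics : List (String × String)) : Decidable (Pre_build_description_from_specifics_py specifics) := by unfold Pre_build_description_from_specifics_py; infer_instance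
def pvWitness_build_description_from_specifics_py : (List (String × String)) :=
  [("Brand", "Nike"), ("Condition", "n/a"), ("Notes", "red sole")]

def Spec_build_description_from_specifics_py (specifics : List (String × String)) (out : String) : Prop := out = build_description_from_specifics_py_alt specifics
instance (specifics : List (String × String)) (out : String) : Decidable (Spec_build_description_from_specifics_py specifics out) := by unfold Spec_build_description_from_specifics_py; infer_instance

-- ===== CLAIM (what is proved, stated in full; the proofs are below) =====
def Claim_equal_build_description_from_specifics_py : Prop := ∀ (specifics : List (String × String)), Dom_build_description_from_specifics_py specifics → Pre_build_description_from_specifics_py specifics → Spec_build_description_from_specifics_py specifics (build_description_from_specifics_py specifics)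

-- ===== LEMMAS AND PROOFS =====

-- abbreviations used only by the proofs
def pvFmt (kv : String × String) : String := kv.1 ++ ": " ++ kv.2
def pvCond (kv : String × String) : Bool :=
  !(kv.2 == "") && !(["n/a", "does not apply", "-"].contains (PySem.Str.lower kv.2))
def pvPriItems (s : List (String × String)) : List (String × String) :=
  pvPriorityKeys.filterMap (fun k => s.find? (fun p => p.1 == k))

theorem pv_witness_ok :
    Dom_build_description_from_specifics_py pvWitness_build_description_from_specifics_py ∧
    Pre_build_description_from_specifics_py pvWitness_build_description_from_specifics_py := by
  constructor <;> decide


theorem pv_get?_map (s : List (String × String)) (k : String) :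
    ((PySem.Dict.mk s).get? k).map (fun v => k ++ ": " ++ v)
      = (s.find? (fun p => p.1 == k)).map pvFmt := by
  cases h : s.find? (fun p => p.1 == k) with
  | none => simp [PySem.Dict.get?, h]
  | some p =>
      have hk : p.1 = k := by simpa using List.find?_some h
      simp [PySem.Dict.get?, h, pvFmt, hk]

-- first loop of A: the parts component
theorem pvA_fold_fst (s : List (String × String)) (l : List String)
    (acc : List String) (seen : PySem.Set String) :
    (l.foldl (fun (st : List String × PySem.Set String) key =>
        match (PySem.Dict.mk s).get? key with
        | some val => (st.1 ++ [key ++ ": " ++ val], PySem.Set.add st.2 key)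
        | none => st) (acc, seen)).1
      = acc ++ l.filterMap (fun k => ((PySem.Dict.mk s).get? k).map (fun v => k ++ ": " ++ v)) := by
  induction l generalizing acc seen with
  | nil => simp
  | cons k l ih =>
      cases h : (PySem.Dict.mk s).get? k with
      | none => simp [List.foldl_cons, h, ih]
      | some v => simp [List.foldl_cons, h, ih]

-- first loop of A: membership in the 'seen' set
theorem pvA_fold_snd (s : List (String × String)) (l : List String)
    (acc : List String) (seen : PySem.Set String) (k' : String) :
    k' ∈ (l.foldl (fun (st : List String × PySem.Set String) key =>
        match (PySem.Dict.mk s).get? key with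
        | some val => (st.1 ++ [key ++ ": " ++ val], PySem.Set.add st.2 key)
        | none => st) (acc, seen)).2
      ↔ k' ∈ seen ∨ (k' ∈ l ∧ ((PySem.Dict.mk s).get? k').isSome) := by
  induction l generalizing acc seen with
  | nil => simp
  | cons k l ih =>
      by_cases hk : k' = k
      · subst hk
        cases h : (PySem.Dict.mk s).get? k' with
        | none => simp [List.foldl_cons, h, ih]
        | some v =>
            simp only [List.foldl_cons, h, ih, PySem.Set.mem_add, List.mem_cons]
            simp
      · cases h : (PySem.Dict.mk s).get? k with
        | none =>
            simp only [List.foldl_cons, h, ih, List.mem_cons]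
            tauto
        | some v =>
            simp only [List.foldl_cons, h, ih, PySem.Set.mem_add, List.mem_cons]
            tauto

theorem pv_get?_isSome_of_mem (s : List (String × String)) (kv : String × String)
    (h : kv ∈ s) : ((PySem.Dict.mk s).get? kv.1).isSome := by
  simp only [PySem.Dict.get?, Option.isSome_map]
  exact List.find?_isSome.mpr ⟨kv, h, by simp⟩

-- characterization of A's result
theorem pvA_char (s : List (String × String)) :
    build_description_from_specifics_py s
      = PySem.Str.join " | " ((pvPriItems s).map pvFmt ++
          (s.filter (fun kv => !(pvPriorityKeys.contains kv.1) && pvCond kv)).map pvFmt) := by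
  unfold build_description_from_specifics_py
  dsimp only
  rw [PySem.List.foldl_congr_mem (g := fun (acc : List String) kv =>
        if (!(pvPriorityKeys.contains kv.1) && pvCond kv) = true
        then acc ++ [kv.1 ++ ": " ++ kv.2] else acc) _ _ _ ?hcongr]
  case hcongr =>
    intro acc kv hkv
    have hseen : (PySem.Set.contains
        (pvPriorityKeys.foldl (fun (st : List String × PySem.Set String) key =>
          match (PySem.Dict.mk s).get? key with
          | some val => (st.1 ++ [key ++ ": " ++ val], PySem.Set.add st.2 key)
          | none => st) ([], PySem.Set.empty)).2 kv.1)
        = pvPriorityKeys.contains kv.1 := by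
      by_cases hm : kv.1 ∈ pvPriorityKeys
      · have : kv.1 ∈ (pvPriorityKeys.foldl (fun (st : List String × PySem.Set String) key =>
            match (PySem.Dict.mk s).get? key with
            | some val => (st.1 ++ [key ++ ": " ++ val], PySem.Set.add st.2 key)
            | none => st) ([], PySem.Set.empty)).2 := by
          rw [pvA_fold_snd]
          exact Or.inr ⟨hm, pv_get?_isSome_of_mem s kv hkv⟩
        simp only [PySem.Set.contains]
        rw [Bool.eq_iff_iff]
        simp only [List.contains_iff_mem]
        exact iff_of_true this hm
      · have : kv.1 ∉ (pvPriorityKeys.foldl (fun (st : List String × PySem.Set String) key =>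
            match (PySem.Dict.mk s).get? key with
            | some val => (st.1 ++ [key ++ ": " ++ val], PySem.Set.add st.2 key)
            | none => st) ([], PySem.Set.empty)).2 := by
          rw [pvA_fold_snd]
          simp [hm]
        simp only [PySem.Set.contains]
        rw [Bool.eq_iff_iff]
        simp only [List.contains_iff_mem]
        exact iff_of_false this hm
    rw [hseen]
    simp only [pvCond, Bool.and_assoc]
    rfl
  rw [PySem.List.foldl_append_if (p := fun kv => !(pvPriorityKeys.contains kv.1) && pvCond kv)
        (f := fun kv => kv.1 ++ ": " ++ kv.2)]
  rw [pvA_fold_fst, List.nil_append]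
  have hX : pvPriorityKeys.filterMap
      (fun k => ((PySem.Dict.mk s).get? k).map (fun v => k ++ ": " ++ v))
        = (pvPriItems s).map pvFmt := by
    rw [List.filterMap_congr (fun k _ => pv_get?_map s k), ← List.map_filterMap]
    rfl
  rw [hX]
  rfl

-- rank facts
theorem pvRank_le (k : String) : pvRank k ≤ 26 := by
  unfold pvRank
  cases h : PySem.List.index? pvPriorityKeys k with
  | none => exact le_refl _
  | some i =>
      obtain ⟨hk, -, -⟩ := PySem.List.getElem_of_index?_eq_some h
      exact le_of_lt hk

theorem pvRank_lt_iff (k : String) : pvRank k < 26 ↔ k ∈ pvPriorityKeys := by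
  unfold pvRank
  cases h : PySem.List.index? pvPriorityKeys k with
  | none =>
      simp only [PySem.List.index?_eq_none_iff] at h
      simp [h]
  | some i =>
      obtain ⟨hk, -, -⟩ := PySem.List.getElem_of_index?_eq_some h
      have hm : k ∈ pvPriorityKeys := by
        rw [← PySem.List.index?_isSome_iff (xs := pvPriorityKeys) (v := k), h]; rfl
      simpa [hm] using hk

theorem pv_contains_eq (k : String) :
    pvPriorityKeys.contains k = decide (pvRank k < 26) := by
  rw [Bool.eq_iff_iff]
  simp [pvRank_lt_iff]

-- inserting into A ++ R when x sorts strictly before everything in R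
theorem pv_insertBy_append {α : Type} (bef : α → α → Bool) (x : α) (A R : List α)
    (hR : ∀ y ∈ R, bef x y = true) :
    PySem.List.insertBy bef x (A ++ R) = PySem.List.insertBy bef x A ++ R := by
  induction A with
  | nil =>
      cases R with
      | nil => rfl
      | cons r R' => simp [PySem.List.insertBy, hR r (by simp)]
  | cons a A' ih =>
      by_cases h : bef x a = true
      · simp [PySem.List.insertBy, h]
      · simp only [List.cons_append, PySem.List.insertBy, h]
        simp [ih]

theorem pv_sorted_step {α : Type} (key : α → Nat) (s : List α) (x : α) :
    PySem.List.sorted (s ++ [x]) key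
      = PySem.List.insertBy (fun a b => decide (key a < key b)) x (PySem.List.sorted s key) := by
  rw [PySem.List.sorted_eq_foldl_insertBy, PySem.List.sorted_eq_foldl_insertBy, List.foldl_append]
  rfl

-- stable-sort decomposition at the top key value c
theorem pv_sorted_split {α : Type} (key : α → Nat) (c : Nat) (hle : ∀ x, key x ≤ c)
    (s : List α) :
    PySem.List.sorted s key
      = PySem.List.sorted (s.filter (fun x => decide (key x < c))) key
          ++ s.filter (fun x => !decide (key x < c)) := by
  induction s using List.reverseRecOn with
  | nil => simp [PySem.List.sorted_eq_foldl_insertBy]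
  | append_singleton s x ih =>
      rw [pv_sorted_step, ih, List.filter_append, List.filter_append]
      by_cases hx : key x < c
      · have h1 : List.filter (fun y => decide (key y < c)) [x] = [x] := by simp [hx]
        have h2 : List.filter (fun y => !decide (key y < c)) [x] = [] := by simp [hx]
        rw [h1, h2, List.append_nil, pv_sorted_step]
        exact pv_insertBy_append _ x _ _ (fun y hy => by
          have hyc : ¬ (key y < c) := by
            simpa using (List.of_mem_filter (p := fun y => !decide (key y < c)) hy)
          exact decide_eq_true (Nat.lt_of_lt_of_le hx (Nat.le_of_not_lt hyc)))
      · have h1 : List.filter (fun y => decide (key y < c)) [x] = [] := by simp [hx]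
        have h2 : List.filter (fun y => !decide (key y < c)) [x] = [x] := by simp [hx]
        have hins := PySem.List.insertBy_of_forall_not_before
          (fun a b => decide (key a < key b)) x
          (PySem.List.sorted (List.filter (fun y => decide (key y < c)) s) key
            ++ List.filter (fun y => !decide (key y < c)) s)
          (fun y hy => decide_eq_false (Nat.not_lt.mpr
            (Nat.le_trans (hle y) (Nat.le_of_not_lt hx))))
        rw [h1, h2, List.append_nil, hins, List.append_assoc]

theorem pv_key_unique (s : List (String × String))
    (hnd : (s.map Prod.fst).Nodup) {y z : String × String}
    (hy : y ∈ s) (hz : z ∈ s) (h1 : y.1 = z.1) : y = z :=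
  List.inj_on_of_nodup_map hnd hy hz h1

theorem pv_mem_priItems (s : List (String × String))
    (hnd : (s.map Prod.fst).Nodup) (x : String × String) :
    x ∈ pvPriItems s ↔ x ∈ s ∧ x.1 ∈ pvPriorityKeys := by
  unfold pvPriItems
  rw [List.mem_filterMap]
  constructor
  · rintro ⟨k, hk, hf⟩
    have hx1 : x.1 = k := by simpa using List.find?_some hf
    exact ⟨List.mem_of_find?_eq_some hf, hx1 ▸ hk⟩
  · rintro ⟨hxs, hxp⟩
    refine ⟨x.1, hxp, ?_⟩
    have hsome : (s.find? (fun p => p.1 == x.1)).isSome :=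
      List.find?_isSome.mpr ⟨x, hxs, by simp⟩
    obtain ⟨z, hz⟩ := Option.isSome_iff_exists.mp hsome
    have hz1 : z.1 = x.1 := by simpa using List.find?_some hz
    have : z = x := pv_key_unique s hnd (List.mem_of_find?_eq_some hz) hxs hz1
    rw [hz, this]

theorem pv_pri_nodup : pvPriorityKeys.Nodup := by decide

theorem pv_pri_pairwise : pvPriorityKeys.Pairwise (fun a b => pvRank a < pvRank b) := by decide

theorem pv_priItems_nodup (s : List (String × String)) : (pvPriItems s).Nodup := by
  unfold pvPriItems
  refine List.Nodup.filterMap ?_ pv_pri_nodup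
  intro a a' b hb hb'
  simp only [Option.mem_def] at hb hb'
  have h1 : b.1 = a := by simpa using List.find?_some hb
  have h2 : b.1 = a' := by simpa using List.find?_some hb'
  rw [← h1, h2]

theorem pv_priItems_pairwise (s : List (String × String)) :
    (pvPriItems s).Pairwise (fun a b => pvRank a.1 < pvRank b.1) := by
  unfold pvPriItems
  rw [List.pairwise_filterMap]
  refine pv_pri_pairwise.imp_of_mem ?_
  intro a a' ha ha' hlt b hb b' hb'
  have h1 : b.1 = a := by simpa using List.find?_some hb
  have h2 : b'.1 = a' := by simpa using List.find?_some hb'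
  rw [h1, h2]
  exact hlt

theorem pv_priItems_perm (s : List (String × String)) (hnd : (s.map Prod.fst).Nodup) :
    (pvPriItems s).Perm (s.filter (fun kv => decide (pvRank kv.1 < 26))) := by
  refine List.perm_of_nodup_nodup_toFinset_eq (pv_priItems_nodup s)
    ((List.Nodup.of_map _ hnd).filter _) ?_
  ext x
  simp [List.mem_toFinset, pv_mem_priItems s hnd, pvRank_lt_iff, And.comm]

theorem pv_sorted_pri (s : List (String × String)) (hnd : (s.map Prod.fst).Nodup) :
    PySem.List.sorted (s.filter (fun kv => decide (pvRank kv.1 < 26))) (fun kv => pvRank kv.1)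
      = pvPriItems s :=
  PySem.List.sorted_eq_of_perm_of_pairwise_lt _ _ _ (pv_priItems_perm s hnd)
    (pv_priItems_pairwise s)

-- characterization of B's result
theorem pvB_char (s : List (String × String)) (hnd : (s.map Prod.fst).Nodup) :
    build_description_from_specifics_py_alt s
      = PySem.Str.join " | " ((pvPriItems s).map pvFmt ++
          (s.filter (fun kv => !(pvPriorityKeys.contains kv.1) && pvCond kv)).map pvFmt) := by
  unfold build_description_from_specifics_py_alt
  dsimp only
  rw [pv_sorted_split (fun kv => pvRank kv.1) 26 (fun kv => pvRank_le kv.1) s]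
  rw [pv_sorted_pri s hnd, List.foldl_append]
  rw [PySem.List.foldl_congr_mem (pvPriItems s) _ (fun acc kv => acc ++ [pvFmt kv]) _ ?hpri]
  case hpri =>
    intro acc kv hkv
    have hm : kv.1 ∈ pvPriorityKeys := ((pv_mem_priItems s hnd kv).mp hkv).2
    simp only [List.contains_iff_mem.mpr hm]
    rfl
  rw [PySem.List.foldl_append_singleton_eq_map, List.nil_append]
  rw [PySem.List.foldl_congr_mem _ _ (fun (acc : List String) kv =>
        if pvCond kv = true then acc ++ [pvFmt kv] else acc) _ ?hrest]
  case hrest =>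
    intro acc kv hkv
    have hr : ¬ (pvRank kv.1 < 26) := by
      have := List.of_mem_filter hkv
      simpa using this
    have hm : kv.1 ∉ pvPriorityKeys := fun hc => hr ((pvRank_lt_iff kv.1).mpr hc)
    have hcont : pvPriorityKeys.contains kv.1 = false := by
      rw [Bool.eq_false_iff]
      intro hc
      exact hm (List.contains_iff_mem.mp hc)
    simp only [hcont]
    rfl
  rw [PySem.List.foldl_append_if (p := pvCond) (f := pvFmt), List.filter_filter]
  have hf : List.filter (fun a => pvCond a && !decide (pvRank a.1 < 26)) s
      = List.filter (fun kv => !pvPriorityKeys.contains kv.1 && pvCond kv) s := by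
    refine List.filter_congr ?_
    intro kv _
    rw [pv_contains_eq, Bool.and_comm]
  rw [hf]

-- ===== VERDICT (by name: the statement is the Claim_ definition above) =====
theorem build_description_from_specifics_py_spec : Claim_equal_build_description_from_specifics_py := by
  intro s _ hpre
  show build_description_from_specifics_py s = build_description_from_specifics_py_alt s
  rw [pvA_char s, pvB_char s hpre]
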